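-- pv_equiv track=rewrite | github.com/rahulgavhar/codezen-scrapper | scrapper/problem.py | _clean_block
-- ===== SOURCE A (Python) =====
-- def _clean_block(lines):
-- 	# Strip only edge-empty lines so internal spacing remains readable.
-- 	start = 0
-- 	end = len(lines)
-- 	while start < end and not lines[start].strip():
-- 		start += 1
-- 	while end > start and not lines[end - 1].strip():
-- 		end -= 1
-- 	return "\n".join(lines[start:end]).strip()
-- ===== SOURCE B (Python) =====
-- def _clean_block(lines):
-- 	# One final strip of the joined text removes exactly what the edge-line loops trimmed.
-- 	return "\n".join(lines).strip()
-- ===== Notes on version B (the rewrite author's own statement) =====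
-- stated objective: simpler
-- what changed: B drops both index-trimming while loops and slicing: it joins the whole list and lets the single final strip() remove the whitespace-only edge lines together with the residual edge whitespace.
import Mathlib
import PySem

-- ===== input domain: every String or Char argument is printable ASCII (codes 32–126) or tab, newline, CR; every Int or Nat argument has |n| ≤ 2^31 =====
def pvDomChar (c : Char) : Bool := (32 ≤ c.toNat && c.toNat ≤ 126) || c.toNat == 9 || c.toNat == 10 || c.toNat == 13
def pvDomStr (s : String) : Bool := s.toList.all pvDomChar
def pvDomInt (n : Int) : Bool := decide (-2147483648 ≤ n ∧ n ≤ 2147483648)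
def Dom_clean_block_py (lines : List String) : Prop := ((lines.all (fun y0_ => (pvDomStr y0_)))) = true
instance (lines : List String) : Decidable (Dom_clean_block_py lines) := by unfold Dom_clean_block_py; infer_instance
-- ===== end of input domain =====

-- A trims whitespace-only edge lines with two index loops, slices, joins and strips;
-- B simply joins all lines and strips once (same value; objective: simpler).


-- ===== PORT A =====
-- first while loop: advance start while start < e and lines[start].strip() is falsy (empty)
-- (lines.getD start "" : start < e ≤ lines.length throughout, so the index is always in range)
def clean_block_py_start (lines : List String) (start e : Nat) : Nat :=
  if _h : start < e ∧ PySem.Str.strip (lines.getD start "") = "" then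
    clean_block_py_start lines (start + 1) e
  else start
termination_by e - start

-- second while loop: lower e while e > start and lines[e-1].strip() is falsy (empty)
def clean_block_py_end (lines : List String) (start e : Nat) : Nat :=
  if _h : start < e ∧ PySem.Str.strip (lines.getD (e - 1) "") = "" then
    clean_block_py_end lines start (e - 1)
  else e
termination_by e

def clean_block_py (lines : List String) : String :=
  PySem.Str.strip (PySem.Str.join "\n" (PySem.List.slice lines
    (some ((clean_block_py_start lines 0 lines.length : Nat) : Int))
    (some ((clean_block_py_end lines (clean_block_py_start lines 0 lines.length) lines.length : Nat) : Int))))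

-- ===== PORT B =====
def clean_block_py_alt (lines : List String) : String :=
  PySem.Str.strip (PySem.Str.join "\n" lines)

-- ===== PRECONDITION & SPEC =====
def Spec_clean_block_py (lines : List String) (out : String) : Prop := out = clean_block_py_alt lines
instance (lines : List String) (out : String) : Decidable (Spec_clean_block_py lines out) := by unfold Spec_clean_block_py; infer_instance

-- ===== CLAIM (what is proved, stated in full; the proofs are below) =====
def Claim_equal_clean_block_py : Prop := ∀ (lines : List String), Dom_clean_block_py lines → Spec_clean_block_py lines (clean_block_py lines)

-- ===== LEMMAS AND PROOFS =====

-- the loops' test, as a Boolean predicate on a line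
def pvWs (s : String) : Bool := decide (PySem.Str.strip s = "")

theorem pvStrip_eq_nil_iff (cs : List Char) :
    PySem.Chars.strip cs = [] ↔ ∀ x ∈ cs, PySem.Chars.isspace x = true := by
  unfold PySem.Chars.strip PySem.Chars.rstrip PySem.Chars.lstrip
  rw [List.reverse_eq_nil_iff, List.dropWhile_eq_nil_iff]
  constructor
  · intro h x hx
    have hsd := List.takeWhile_append_dropWhile (p := PySem.Chars.isspace) (l := cs)
    rcases List.mem_append.mp (hsd ▸ hx) with h1 | h2
    · exact List.mem_takeWhile_imp h1
    · exact h x (List.mem_reverse.mpr h2)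
  · intro h x hx
    exact h x ((List.dropWhile_sublist _).subset (List.mem_reverse.mp hx))

theorem pvWs_iff (s : String) :
    pvWs s = true ↔ ∀ x ∈ s.toList, PySem.Chars.isspace x = true := by
  rw [← pvStrip_eq_nil_iff]
  simp only [pvWs, decide_eq_true_eq, PySem.Str.strip]
  constructor
  · intro h; have := congrArg String.toList h; simpa using this
  · intro h; rw [h]

-- strip ignores an all-whitespace prefix
theorem pvStrip_ws_append (ws ds : List Char)
    (h : ∀ x ∈ ws, PySem.Chars.isspace x = true) :
    PySem.Chars.strip (ws ++ ds) = PySem.Chars.strip ds := by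
  have hnil : List.dropWhile PySem.Chars.isspace ws = [] :=
    List.dropWhile_eq_nil_iff.mpr h
  simp only [PySem.Chars.strip, PySem.Chars.lstrip, List.dropWhile_append, hnil,
    List.isEmpty_nil, if_true]

-- strip ignores an all-whitespace suffix
theorem pvStrip_append_ws (ds ws : List Char)
    (h : ∀ x ∈ ws, PySem.Chars.isspace x = true) :
    PySem.Chars.strip (ds ++ ws) = PySem.Chars.strip ds := by
  have hws : List.dropWhile PySem.Chars.isspace ws.reverse = [] :=
    List.dropWhile_eq_nil_iff.mpr (fun x hx => h x (List.mem_reverse.mp hx))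
  by_cases hd : List.dropWhile PySem.Chars.isspace ds = []
  · have hall : ∀ x ∈ ds ++ ws, PySem.Chars.isspace x = true := by
      intro x hx
      rcases List.mem_append.mp hx with h1 | h2
      · exact List.dropWhile_eq_nil_iff.mp hd x h1
      · exact h x h2
    rw [(pvStrip_eq_nil_iff _).mpr hall,
        (pvStrip_eq_nil_iff _).mpr (List.dropWhile_eq_nil_iff.mp hd)]
  · simp only [PySem.Chars.strip, PySem.Chars.lstrip, PySem.Chars.rstrip,
      List.dropWhile_append]
    have hne : (List.dropWhile PySem.Chars.isspace ds).isEmpty = false := by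
      simpa [List.isEmpty_iff] using hd
    rw [hne]
    simp only [Bool.false_eq_true, if_false, List.reverse_append,
      List.dropWhile_append, hws, List.isEmpty_nil, if_true]

-- join over a nonempty list with one line appended on the right
theorem pvJoin_append_singleton (sep : List Char) (r : List Char) (rs : List (List Char)) (w : List Char) :
    PySem.Chars.join sep ((r :: rs) ++ [w]) = PySem.Chars.join sep (r :: rs) ++ sep ++ w := by
  induction rs generalizing r with
  | nil =>
      rw [List.cons_append, List.nil_append, PySem.Chars.join_cons_cons,
          PySem.Chars.join_singleton, PySem.Chars.join_singleton]
  | cons r2 rs2 ih =>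
      rw [show (r :: r2 :: rs2) ++ [w] = r :: r2 :: (rs2 ++ [w]) from rfl,
          PySem.Chars.join_cons_cons,
          show r2 :: (rs2 ++ [w]) = (r2 :: rs2) ++ [w] from rfl,
          ih r2, PySem.Chars.join_cons_cons]
      simp [List.append_assoc]

-- strip∘join ignores a leading all-whitespace line
theorem pvJoin_cons_ws (w : String) (rest : List String) (hw : pvWs w = true) :
    PySem.Chars.strip (PySem.Chars.join ['\n'] (List.map String.toList (w :: rest)))
      = PySem.Chars.strip (PySem.Chars.join ['\n'] (List.map String.toList rest)) := by
  have hws := (pvWs_iff w).mp hw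
  cases rest with
  | nil =>
      rw [List.map_cons, List.map_nil, PySem.Chars.join_singleton, PySem.Chars.join_nil]
      rw [(pvStrip_eq_nil_iff _).mpr hws]
      rfl
  | cons r rs =>
      rw [List.map_cons, List.map_cons, PySem.Chars.join_cons_cons]
      refine pvStrip_ws_append _ _ ?_
      intro x hx
      rcases List.mem_append.mp hx with h1 | h2
      · exact hws x h1
      · simp only [List.mem_singleton] at h2; subst h2; decide

-- strip∘join ignores a trailing all-whitespace line
theorem pvJoin_concat_ws (rest : List String) (w : String) (hw : pvWs w = true) :
    PySem.Chars.strip (PySem.Chars.join ['\n'] (List.map String.toList (rest ++ [w])))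
      = PySem.Chars.strip (PySem.Chars.join ['\n'] (List.map String.toList rest)) := by
  have hws := (pvWs_iff w).mp hw
  cases rest with
  | nil => exact pvJoin_cons_ws w [] hw
  | cons r rs =>
      rw [List.map_append, List.map_cons, List.map_singleton,
          pvJoin_append_singleton, List.append_assoc]
      refine pvStrip_append_ws _ _ ?_
      intro x hx
      rcases List.mem_append.mp hx with h1 | h2
      · simp only [List.mem_singleton] at h1; subst h1; decide
      · exact hws x h2

-- drop all-whitespace prefix lines under strip∘join
theorem pvJoin_drop_prefix (pre xs : List String) (h : ∀ w ∈ pre, pvWs w = true) :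
    PySem.Chars.strip (PySem.Chars.join ['\n'] (List.map String.toList (pre ++ xs)))
      = PySem.Chars.strip (PySem.Chars.join ['\n'] (List.map String.toList xs)) := by
  induction pre with
  | nil => simp
  | cons p ps ih =>
      rw [List.cons_append, List.map_cons]
      rw [show p.toList :: List.map String.toList (ps ++ xs)
            = List.map String.toList (p :: (ps ++ xs)) from rfl]
      rw [pvJoin_cons_ws p (ps ++ xs) (h p List.mem_cons_self)]
      exact ih (fun w hw => h w (List.mem_cons_of_mem _ hw))

-- drop all-whitespace suffix lines under strip∘join
theorem pvJoin_drop_suffix (xs suf : List String) (h : ∀ w ∈ suf, pvWs w = true) :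
    PySem.Chars.strip (PySem.Chars.join ['\n'] (List.map String.toList (xs ++ suf)))
      = PySem.Chars.strip (PySem.Chars.join ['\n'] (List.map String.toList xs)) := by
  induction suf using List.reverseRecOn with
  | nil => simp
  | append_singleton init w ih =>
      rw [← List.append_assoc,
          pvJoin_concat_ws (xs ++ init) w (h w (by simp)),
          ih (fun v hv => h v (List.mem_append_left _ hv))]

-- the first loop computes the length of the whitespace-line prefix
theorem pvStart_eq (lines : List String) :
    ∀ s, s ≤ lines.length →
      clean_block_py_start lines s lines.length
        = s + ((lines.drop s).takeWhile pvWs).length := by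
  intro s hs
  induction hn : lines.length - s generalizing s with
  | zero =>
      have hse : s = lines.length := by omega
      rw [clean_block_py_start]
      subst hse
      simp [List.drop_length]
  | succ n ih =>
      have hlt : s < lines.length := by omega
      have hdrop := List.drop_eq_getElem_cons hlt
      rw [clean_block_py_start]
      by_cases hw : PySem.Str.strip (lines.getD s "") = ""
      · rw [dif_pos ⟨hlt, hw⟩, ih (s + 1) (by omega) (by omega)]
        rw [hdrop, List.takeWhile_cons]
        have hb : pvWs lines[s] = true := by
          simp only [pvWs, decide_eq_true_eq]
          rwa [List.getD_eq_getElem lines "" hlt] at hw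
        rw [hb]
        simp
        omega
      · rw [dif_neg (by tauto)]
        rw [hdrop, List.takeWhile_cons]
        have hb : pvWs lines[s] = false := by
          simp only [pvWs, decide_eq_false_iff_not]
          rwa [List.getD_eq_getElem lines "" hlt] at hw
        rw [hb]
        simp

-- the second loop strips whitespace lines off the right end of the window
theorem pvEnd_eq (lines : List String) (start : Nat) (hstart : start ≤ lines.length) :
    ∀ e, start ≤ e → e ≤ lines.length →
      clean_block_py_end lines start e
        = start + ((((lines.drop start).take (e - start)).reverse.dropWhile pvWs).reverse).length := by
  intro e he1 he2
  induction hn : e - start generalizing e with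
  | zero =>
      have hse : e = start := by omega
      rw [clean_block_py_end]
      subst hse
      simp
  | succ n ih =>
      rw [← hn]
      have hlt : start < e := by omega
      have hidx : e - 1 < lines.length := by omega
      have hsplit : (lines.drop start).take (e - start)
          = (lines.drop start).take (e - 1 - start) ++ [lines[e-1]] := by
        have h1 : e - start = (e - 1 - start) + 1 := by omega
        rw [h1, List.take_add_one]
        have hg : (lines.drop start)[e - 1 - start]? = some lines[e-1] := by
          rw [List.getElem?_drop, List.getElem?_eq_getElem (by omega)]
          congr 2
          omega
        rw [hg]
        rfl
      rw [clean_block_py_end]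
      by_cases hw : PySem.Str.strip (lines.getD (e - 1) "") = ""
      · rw [dif_pos ⟨hlt, hw⟩, ih (e - 1) (by omega) (by omega) (by omega)]
        rw [hsplit, List.reverse_append, List.reverse_singleton, List.singleton_append,
            List.dropWhile_cons]
        have hb : pvWs lines[e-1] = true := by
          simp only [pvWs, decide_eq_true_eq]
          rwa [List.getD_eq_getElem lines "" hidx] at hw
        rw [hb]
        have h2 : e - 1 - start = n := by omega
        rw [h2]
        simp
      · rw [dif_neg (by tauto)]
        rw [hsplit, List.reverse_append, List.reverse_singleton, List.singleton_append,
            List.dropWhile_cons]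
        have hb : pvWs lines[e-1] = false := by
          simp only [pvWs, decide_eq_false_iff_not]
          rwa [List.getD_eq_getElem lines "" hidx] at hw
        rw [hb]
        simp only [Bool.false_eq_true, if_false, List.reverse_cons, List.length_append,
          List.length_reverse, List.length_singleton, List.length_take, List.length_drop]
        omega

-- ===== VERDICT (by name: the statement is the Claim_ definition above) =====
theorem clean_block_py_spec : Claim_equal_clean_block_py := by
  intro lines _hdom
  unfold Spec_clean_block_py clean_block_py clean_block_py_alt
  have hsplitL : lines.takeWhile pvWs ++ lines.dropWhile pvWs = lines :=
    List.takeWhile_append_dropWhile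
  set pre := lines.takeWhile pvWs with hpre
  set rest := lines.dropWhile pvWs with hrest
  have hprelen : pre.length ≤ lines.length := by
    rw [← hsplitL]; simp
  have hstart : clean_block_py_start lines 0 lines.length = pre.length := by
    rw [pvStart_eq lines 0 (by omega)]
    simp [hpre]
  rw [hstart]
  have hdropPre : lines.drop pre.length = rest := by
    conv_lhs => rw [← hsplitL]
    rw [List.drop_left]
  set mid := (rest.reverse.dropWhile pvWs).reverse with hmid
  set suf := (rest.reverse.takeWhile pvWs).reverse with hsuf
  have hrestsplit : rest = mid ++ suf := by
    rw [hmid, hsuf, ← List.reverse_append, List.takeWhile_append_dropWhile,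
        List.reverse_reverse]
  have hend : clean_block_py_end lines pre.length lines.length = pre.length + mid.length := by
    rw [pvEnd_eq lines pre.length hprelen lines.length hprelen (le_refl _)]
    congr 2
    rw [List.take_of_length_le (by simp), hdropPre]
  rw [hend]
  have hslice : PySem.List.slice lines (some ((pre.length : Nat) : Int))
      (some (((pre.length + mid.length : Nat) : Nat) : Int)) = mid := by
    rw [PySem.List.slice_toNat lines (by positivity) (by positivity)]
    simp only [Int.toNat_natCast]
    rw [hdropPre]
    have h3 : pre.length + mid.length - pre.length = mid.length := by omega
    rw [h3, hrestsplit, List.take_left]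
  rw [hslice]
  -- now both sides are strips of joins; move to char lists
  simp only [PySem.Str.strip, PySem.Str.join]
  refine congrArg String.ofList ?_
  simp only [String.toList_ofList]
  rw [show ("\n" : String).toList = ['\n'] from rfl]
  have hsufws : ∀ w ∈ suf, pvWs w = true := by
    intro w hw
    rw [hsuf, List.mem_reverse] at hw
    exact List.mem_takeWhile_imp hw
  have hprews : ∀ w ∈ pre, pvWs w = true := fun w hw => List.mem_takeWhile_imp hw
  conv_rhs => rw [← hsplitL]
  rw [pvJoin_drop_prefix pre rest hprews, hrestsplit,
      pvJoin_drop_suffix mid suf hsufws]
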